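-- pv_equiv track=rewrite | github.com/Astro-Han/quantclass-sync | scripts/migrate_compat_layer.py | build_import_lines
-- ===== SOURCE A (Python) =====
-- SYMBOL_MODULE = {
--     # constants
--     "AGGREGATE_SPLIT_COLS": "constants", "DEFAULT_CATALOG_FILE": "constants",
--     "EXIT_CODE_GENERAL_FAILURE": "constants", "EXIT_CODE_NETWORK_OR_REMOTE_DATA_FAILURE": "constants",
--     "EXIT_CODE_NO_EXECUTABLE_PRODUCTS": "constants", "PREPROCESS_PRODUCT": "constants",
--     "PRODUCT_MODE_LOCAL_SCAN": "constants", "REASON_MERGE_ERROR": "constants",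
--     "REASON_NO_DATA_FOR_DATE": "constants", "REASON_NO_VALID_OUTPUT": "constants",
--     "REASON_OK": "constants", "REASON_PREPROCESS_DRY_RUN": "constants",
--     "REASON_PREPROCESS_FAILED": "constants", "REASON_PREPROCESS_FALLBACK_FULL_OK": "constants",
--     "REASON_PREPROCESS_INCREMENTAL_OK": "constants", "REASON_PREPROCESS_SKIPPED_NO_DELTA": "constants",
--     "REASON_UP_TO_DATE": "constants", "STRATEGY_MERGE_KNOWN": "constants",
--     "TIMESTAMP_FILE_NAME": "constants", "UTF8_BOM": "constants",
--     "PREPROCESS_TRIGGER_PRODUCTS": "constants",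
--     # models
--     "CommandContext": "models", "CsvPayload": "models", "EmptyDownloadLinkError": "models",
--     "FatalRequestError": "models", "ProductPlan": "models", "ProductRunResult": "models",
--     "ProductSyncError": "models", "RunReport": "models", "SyncStats": "models",
--     "UserConfig": "models", "RULES": "models", "normalize_product_name": "models",
--     "split_products": "models", "utc_now_iso": "models", "new_run_id": "models",
--     "log_info": "models", "log_error": "models", "log_debug": "models",
--     "DatasetRule": "models",
--     # http_client
--     "request_data": "http_client", "get_latest_time": "http_client",
--     "get_latest_times": "http_client", "get_download_link": "http_client",
--     "_reset_http_metrics": "http_client", "_http_metrics_for_product": "http_client",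
--     "parse_latest_time_candidates": "http_client",
--     # orchestrator
--     "process_product": "orchestrator", "run_update_with_settings": "orchestrator",
--     "load_catalog_or_raise": "orchestrator", "build_headers_or_raise": "orchestrator",
--     "_build_headers": "orchestrator", "_execute_plans": "orchestrator",
--     "_resolve_requested_dates_for_plan": "orchestrator",
--     "_probe_downloadable_dates": "orchestrator",
--     "_run_builtin_coin_preprocess": "orchestrator",
--     "_maybe_run_coin_preprocess": "orchestrator",
--     # cli
--     "app": "cli", "global_options": "cli", "cmd_setup": "cli", "cmd_update": "cli",
--     "cmd_init": "cli", "cmd_one_data": "cli", "cmd_all_data": "cli",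
--     "cmd_repair_sort": "cli", "cmd_status": "cli", "ensure_data_root_ready": "cli",
--     # reporting
--     "_append_result": "reporting", "_finalize_and_write_report": "reporting",
--     "_new_report": "reporting", "resolve_report_path": "reporting",
--     "write_run_report": "reporting",
--     # csv_engine
--     "decode_text": "csv_engine", "read_csv_payload": "csv_engine",
--     "sync_payload_to_target": "csv_engine",
--     # file_sync
--     "repair_sort_product_files": "file_sync", "sortable_products": "file_sync",
--     "sync_from_extract": "file_sync", "sync_known_product": "file_sync",
--     # config
--     "build_product_plan": "config", "load_user_config_or_raise": "config",
--     "save_user_config_atomic": "config", "save_user_secrets_atomic": "config",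
--     # status_store
--     "connect_status_db": "status_store", "load_product_status": "status_store",
--     "report_dir_path": "status_store", "open_status_db": "status_store",
--     "export_status_json": "status_store", "status_json_path": "status_store",
--     "upsert_product_status": "status_store", "ProductStatus": "status_store",
-- }
--
-- def build_import_lines(symbols: set) -> str:
--     """根据符号集合生成按模块分组的 import 行。"""
--     by_module: dict = {}
--     unknown = []
--     for sym in sorted(symbols):
--         module = SYMBOL_MODULE.get(sym)
--         if module:
--             by_module.setdefault(module, []).append(sym)
--         else:
--             unknown.append(sym)
--
--     lines = []
--     for module in sorted(by_module):
--         syms = ", ".join(sorted(by_module[module]))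
--         lines.append(f"from quantclass_sync_internal.{module} import {syms}")
--
--     if unknown:
--         lines.append(f"# TODO: 未知符号需手动映射: {', '.join(sorted(unknown))}")
--
--     return "\n".join(lines)
-- ===== SOURCE B (Python) =====
-- MODULE_SYMBOLS = {
--     "cli": [
--         "app",
--         "global_options",
--         "cmd_setup",
--         "cmd_update",
--         "cmd_init",
--         "cmd_one_data",
--         "cmd_all_data",
--         "cmd_repair_sort",
--         "cmd_status",
--         "ensure_data_root_ready",
--     ],
--     "config": [
--         "build_product_plan",
--         "load_user_config_or_raise",
--         "save_user_config_atomic",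
--         "save_user_secrets_atomic",
--     ],
--     "constants": [
--         "AGGREGATE_SPLIT_COLS",
--         "DEFAULT_CATALOG_FILE",
--         "EXIT_CODE_GENERAL_FAILURE",
--         "EXIT_CODE_NETWORK_OR_REMOTE_DATA_FAILURE",
--         "EXIT_CODE_NO_EXECUTABLE_PRODUCTS",
--         "PREPROCESS_PRODUCT",
--         "PRODUCT_MODE_LOCAL_SCAN",
--         "REASON_MERGE_ERROR",
--         "REASON_NO_DATA_FOR_DATE",
--         "REASON_NO_VALID_OUTPUT",
--         "REASON_OK",
--         "REASON_PREPROCESS_DRY_RUN",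
--         "REASON_PREPROCESS_FAILED",
--         "REASON_PREPROCESS_FALLBACK_FULL_OK",
--         "REASON_PREPROCESS_INCREMENTAL_OK",
--         "REASON_PREPROCESS_SKIPPED_NO_DELTA",
--         "REASON_UP_TO_DATE",
--         "STRATEGY_MERGE_KNOWN",
--         "TIMESTAMP_FILE_NAME",
--         "UTF8_BOM",
--         "PREPROCESS_TRIGGER_PRODUCTS",
--     ],
--     "csv_engine": [
--         "decode_text",
--         "read_csv_payload",
--         "sync_payload_to_target",
--     ],
--     "file_sync": [
--         "repair_sort_product_files",
--         "sortable_products",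
--         "sync_from_extract",
--         "sync_known_product",
--     ],
--     "http_client": [
--         "request_data",
--         "get_latest_time",
--         "get_latest_times",
--         "get_download_link",
--         "_reset_http_metrics",
--         "_http_metrics_for_product",
--         "parse_latest_time_candidates",
--     ],
--     "models": [
--         "CommandContext",
--         "CsvPayload",
--         "EmptyDownloadLinkError",
--         "FatalRequestError",
--         "ProductPlan",
--         "ProductRunResult",
--         "ProductSyncError",
--         "RunReport",
--         "SyncStats",
--         "UserConfig",
--         "RULES",
--         "normalize_product_name",
--         "split_products",
--         "utc_now_iso",
--         "new_run_id",
--         "log_info",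
--         "log_error",
--         "log_debug",
--         "DatasetRule",
--     ],
--     "orchestrator": [
--         "process_product",
--         "run_update_with_settings",
--         "load_catalog_or_raise",
--         "build_headers_or_raise",
--         "_build_headers",
--         "_execute_plans",
--         "_resolve_requested_dates_for_plan",
--         "_probe_downloadable_dates",
--         "_run_builtin_coin_preprocess",
--         "_maybe_run_coin_preprocess",
--     ],
--     "reporting": [
--         "_append_result",
--         "_finalize_and_write_report",
--         "_new_report",
--         "resolve_report_path",
--         "write_run_report",
--     ],
--     "status_store": [
--         "connect_status_db",
--         "load_product_status",
--         "report_dir_path",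
--         "open_status_db",
--         "export_status_json",
--         "status_json_path",
--         "upsert_product_status",
--         "ProductStatus",
--     ],
-- }
-- KNOWN = [s for syms in MODULE_SYMBOLS.values() for s in syms]
--
--
-- def build_import_lines(symbols: set) -> str:
--     """Drive the output from an inverted module->symbols table instead of
--     accumulating a dict: one line per module, filtering the sorted symbols."""
--     ss = sorted(symbols)
--     lines = []
--     for module, known in MODULE_SYMBOLS.items():
--         group = [s for s in ss if s in known]
--         if group:
--             lines.append(f"from quantclass_sync_internal.{module} import {', '.join(group)}")
--     unknown = [s for s in ss if s not in KNOWN]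
--     if unknown:
--         lines.append(f"# TODO: 未知符号需手动映射: {', '.join(unknown)}")
--     return "\n".join(lines)
-- ===== Notes on version B (the rewrite author's own statement) =====
-- stated objective: alternative
-- what changed: B inverts the data: instead of dict-of-lists accumulation keyed per symbol and re-sorting keys and groups, it carries a fixed inverted module->symbols table (modules already in alphabetical order) and emits one line per module by filtering the sorted input once, with unknown symbols found by one membership filter.
import Mathlib
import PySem

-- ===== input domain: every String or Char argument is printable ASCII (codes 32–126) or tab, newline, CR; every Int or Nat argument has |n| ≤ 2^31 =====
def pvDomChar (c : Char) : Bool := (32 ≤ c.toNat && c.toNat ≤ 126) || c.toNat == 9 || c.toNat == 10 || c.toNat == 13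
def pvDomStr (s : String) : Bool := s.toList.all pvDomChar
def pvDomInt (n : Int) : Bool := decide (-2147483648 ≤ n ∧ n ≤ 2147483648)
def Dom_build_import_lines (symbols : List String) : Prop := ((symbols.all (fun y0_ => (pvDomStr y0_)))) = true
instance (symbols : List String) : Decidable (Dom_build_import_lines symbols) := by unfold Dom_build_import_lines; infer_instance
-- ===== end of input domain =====

-- B replaces A's dict-of-lists accumulation (and its key/value re-sorts) by a fixed inverted
-- module -> symbols table scanned in order, filtering the sorted symbol list (objective: alternative).

-- ===== PORT A =====
-- the module-level constant A reads
def SYMBOL_MODULE : PySem.Dict String String := PySem.Dict.ofList [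
  ("AGGREGATE_SPLIT_COLS", "constants"),
  ("DEFAULT_CATALOG_FILE", "constants"),
  ("EXIT_CODE_GENERAL_FAILURE", "constants"),
  ("EXIT_CODE_NETWORK_OR_REMOTE_DATA_FAILURE", "constants"),
  ("EXIT_CODE_NO_EXECUTABLE_PRODUCTS", "constants"),
  ("PREPROCESS_PRODUCT", "constants"),
  ("PRODUCT_MODE_LOCAL_SCAN", "constants"),
  ("REASON_MERGE_ERROR", "constants"),
  ("REASON_NO_DATA_FOR_DATE", "constants"),
  ("REASON_NO_VALID_OUTPUT", "constants"),
  ("REASON_OK", "constants"),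
  ("REASON_PREPROCESS_DRY_RUN", "constants"),
  ("REASON_PREPROCESS_FAILED", "constants"),
  ("REASON_PREPROCESS_FALLBACK_FULL_OK", "constants"),
  ("REASON_PREPROCESS_INCREMENTAL_OK", "constants"),
  ("REASON_PREPROCESS_SKIPPED_NO_DELTA", "constants"),
  ("REASON_UP_TO_DATE", "constants"),
  ("STRATEGY_MERGE_KNOWN", "constants"),
  ("TIMESTAMP_FILE_NAME", "constants"),
  ("UTF8_BOM", "constants"),
  ("PREPROCESS_TRIGGER_PRODUCTS", "constants"),
  ("CommandContext", "models"),
  ("CsvPayload", "models"),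
  ("EmptyDownloadLinkError", "models"),
  ("FatalRequestError", "models"),
  ("ProductPlan", "models"),
  ("ProductRunResult", "models"),
  ("ProductSyncError", "models"),
  ("RunReport", "models"),
  ("SyncStats", "models"),
  ("UserConfig", "models"),
  ("RULES", "models"),
  ("normalize_product_name", "models"),
  ("split_products", "models"),
  ("utc_now_iso", "models"),
  ("new_run_id", "models"),
  ("log_info", "models"),
  ("log_error", "models"),
  ("log_debug", "models"),
  ("DatasetRule", "models"),
  ("request_data", "http_client"),
  ("get_latest_time", "http_client"),
  ("get_latest_times", "http_client"),
  ("get_download_link", "http_client"),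
  ("_reset_http_metrics", "http_client"),
  ("_http_metrics_for_product", "http_client"),
  ("parse_latest_time_candidates", "http_client"),
  ("process_product", "orchestrator"),
  ("run_update_with_settings", "orchestrator"),
  ("load_catalog_or_raise", "orchestrator"),
  ("build_headers_or_raise", "orchestrator"),
  ("_build_headers", "orchestrator"),
  ("_execute_plans", "orchestrator"),
  ("_resolve_requested_dates_for_plan", "orchestrator"),
  ("_probe_downloadable_dates", "orchestrator"),
  ("_run_builtin_coin_preprocess", "orchestrator"),
  ("_maybe_run_coin_preprocess", "orchestrator"),
  ("app", "cli"),
  ("global_options", "cli"),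
  ("cmd_setup", "cli"),
  ("cmd_update", "cli"),
  ("cmd_init", "cli"),
  ("cmd_one_data", "cli"),
  ("cmd_all_data", "cli"),
  ("cmd_repair_sort", "cli"),
  ("cmd_status", "cli"),
  ("ensure_data_root_ready", "cli"),
  ("_append_result", "reporting"),
  ("_finalize_and_write_report", "reporting"),
  ("_new_report", "reporting"),
  ("resolve_report_path", "reporting"),
  ("write_run_report", "reporting"),
  ("decode_text", "csv_engine"),
  ("read_csv_payload", "csv_engine"),
  ("sync_payload_to_target", "csv_engine"),
  ("repair_sort_product_files", "file_sync"),
  ("sortable_products", "file_sync"),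
  ("sync_from_extract", "file_sync"),
  ("sync_known_product", "file_sync"),
  ("build_product_plan", "config"),
  ("load_user_config_or_raise", "config"),
  ("save_user_config_atomic", "config"),
  ("save_user_secrets_atomic", "config"),
  ("connect_status_db", "status_store"),
  ("load_product_status", "status_store"),
  ("report_dir_path", "status_store"),
  ("open_status_db", "status_store"),
  ("export_status_json", "status_store"),
  ("status_json_path", "status_store"),
  ("upsert_product_status", "status_store"),
  ("ProductStatus", "status_store")
]

def build_import_lines (symbols : List String) : String :=
  -- for sym in sorted(symbols): module = SYMBOL_MODULE.get(sym); if module: … else: …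
  -- (every stored module name is nonempty, so `if module:` is exactly the some/none split;
  --  by_module.setdefault(module, []).append(sym) is modify module [] (· ++ [sym]))
  let st := (PySem.List.sorted symbols (fun x => x) false).foldl
    (fun st sym =>
      match PySem.Dict.get? SYMBOL_MODULE sym with
      | some module => (PySem.Dict.modify st.1 module [] (· ++ [sym]), st.2)
      | none => (st.1, st.2 ++ [sym]))
    ((PySem.Dict.empty : PySem.Dict String (List String)), ([] : List String))
  let by_module := st.1
  let unknown := st.2
  -- for module in sorted(by_module): lines.append(f"from … {module} import {', '.join(sorted(by_module[module]))}")
  -- (module ranges over by_module's keys, so by_module[module] never raises; getD [] is exact here)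
  let lines := (PySem.List.sorted (PySem.Dict.keys by_module) (fun x => x) false).foldl
    (fun lines module =>
      lines ++ ["from quantclass_sync_internal." ++ module ++ " import " ++
        PySem.Str.join ", " (PySem.List.sorted (PySem.Dict.getD by_module module []) (fun x => x) false)])
    []
  let lines := if unknown ≠ [] then
      lines ++ ["# TODO: 未知符号需手动映射: " ++ PySem.Str.join ", " (PySem.List.sorted unknown (fun x => x) false)]
    else lines
  PySem.Str.join "\n" lines

-- ===== PORT B =====
-- B's own constant: the inverted table, modules in alphabetical order,
-- symbols of each module in the source table's order (membership only)
def MODULE_SYMBOLS : List (String × List String) := [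
  ("cli", ["app", "global_options", "cmd_setup", "cmd_update", "cmd_init", "cmd_one_data", "cmd_all_data", "cmd_repair_sort", "cmd_status", "ensure_data_root_ready"]),
  ("config", ["build_product_plan", "load_user_config_or_raise", "save_user_config_atomic", "save_user_secrets_atomic"]),
  ("constants", ["AGGREGATE_SPLIT_COLS", "DEFAULT_CATALOG_FILE", "EXIT_CODE_GENERAL_FAILURE", "EXIT_CODE_NETWORK_OR_REMOTE_DATA_FAILURE", "EXIT_CODE_NO_EXECUTABLE_PRODUCTS", "PREPROCESS_PRODUCT", "PRODUCT_MODE_LOCAL_SCAN", "REASON_MERGE_ERROR", "REASON_NO_DATA_FOR_DATE", "REASON_NO_VALID_OUTPUT", "REASON_OK", "REASON_PREPROCESS_DRY_RUN", "REASON_PREPROCESS_FAILED", "REASON_PREPROCESS_FALLBACK_FULL_OK", "REASON_PREPROCESS_INCREMENTAL_OK", "REASON_PREPROCESS_SKIPPED_NO_DELTA", "REASON_UP_TO_DATE", "STRATEGY_MERGE_KNOWN", "TIMESTAMP_FILE_NAME", "UTF8_BOM", "PREPROCESS_TRIGGER_PRODUCTS"]),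
  ("csv_engine", ["decode_text", "read_csv_payload", "sync_payload_to_target"]),
  ("file_sync", ["repair_sort_product_files", "sortable_products", "sync_from_extract", "sync_known_product"]),
  ("http_client", ["request_data", "get_latest_time", "get_latest_times", "get_download_link", "_reset_http_metrics", "_http_metrics_for_product", "parse_latest_time_candidates"]),
  ("models", ["CommandContext", "CsvPayload", "EmptyDownloadLinkError", "FatalRequestError", "ProductPlan", "ProductRunResult", "ProductSyncError", "RunReport", "SyncStats", "UserConfig", "RULES", "normalize_product_name", "split_products", "utc_now_iso", "new_run_id", "log_info", "log_error", "log_debug", "DatasetRule"]),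
  ("orchestrator", ["process_product", "run_update_with_settings", "load_catalog_or_raise", "build_headers_or_raise", "_build_headers", "_execute_plans", "_resolve_requested_dates_for_plan", "_probe_downloadable_dates", "_run_builtin_coin_preprocess", "_maybe_run_coin_preprocess"]),
  ("reporting", ["_append_result", "_finalize_and_write_report", "_new_report", "resolve_report_path", "write_run_report"]),
  ("status_store", ["connect_status_db", "load_product_status", "report_dir_path", "open_status_db", "export_status_json", "status_json_path", "upsert_product_status", "ProductStatus"])
]

-- KNOWN = [s for syms in MODULE_SYMBOLS.values() for s in syms]
def KNOWN : List String := MODULE_SYMBOLS.flatMap (fun p => p.2)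

def build_import_lines_alt (symbols : List String) : String :=
  let ss := PySem.List.sorted symbols (fun x => x) false
  -- for module, known in MODULE_SYMBOLS.items(): group = [s for s in ss if s in known]; if group: append line
  let lines := MODULE_SYMBOLS.foldl
    (fun lines mk =>
      let group := ss.filter (fun s => mk.2.contains s)
      if group ≠ [] then
        lines ++ ["from quantclass_sync_internal." ++ mk.1 ++ " import " ++ PySem.Str.join ", " group]
      else lines)
    []
  -- unknown = [s for s in ss if s not in KNOWN]
  let unknown := ss.filter (fun s => !(KNOWN.contains s))
  let lines := if unknown ≠ [] then
      lines ++ ["# TODO: 未知符号需手动映射: " ++ PySem.Str.join ", " unknown]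
    else lines
  PySem.Str.join "\n" lines

-- ===== PRECONDITION & SPEC =====
def Spec_build_import_lines (symbols : List String) (out : String) : Prop := out = build_import_lines_alt symbols
instance (symbols : List String) (out : String) : Decidable (Spec_build_import_lines symbols out) := by unfold Spec_build_import_lines; infer_instance

-- ===== CLAIM (what is proved, stated in full; the proofs are below) =====
def Claim_equal_build_import_lines : Prop := ∀ (symbols : List String), Dom_build_import_lines symbols → Spec_build_import_lines symbols (build_import_lines symbols)

-- ===== LEMMAS AND PROOFS =====

-- sorted(set(SYMBOL_MODULE.values())): the alphabetical module list A's sorted(by_module) ranges inside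
def pvModules : List String :=
  PySem.List.sorted (PySem.Set.ofList (PySem.Dict.values SYMBOL_MODULE)) (fun x => x) false

-- the symbols mapped to module m, in SYMBOL_MODULE's insertion order
def pvKfun (m : String) : List String :=
  (SYMBOL_MODULE.items.filter (fun p => p.2 == m)).map Prod.fst

-- the intermediate shape both proof halves meet at: lines over pvModules, groups by get? lookup
def pvMid (symbols : List String) : String :=
  let ss := PySem.List.sorted symbols (fun x => x) false
  let lines := pvModules.foldl
    (fun lines module =>
      let syms := ss.filter (fun s => PySem.Dict.get? SYMBOL_MODULE s == some module)
      if syms ≠ [] then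
        lines ++ ["from quantclass_sync_internal." ++ module ++ " import " ++ PySem.Str.join ", " syms]
      else lines)
    []
  let unknown := ss.filter (fun s => !(PySem.Dict.contains SYMBOL_MODULE s))
  let lines := if unknown ≠ [] then
      lines ++ ["# TODO: 未知符号需手动映射: " ++ PySem.Str.join ", " unknown]
    else lines
  PySem.Str.join "\n" lines

def pvKnown (s : String) : Bool := (PySem.Dict.get? SYMBOL_MODULE s).isSome
def pvKm (s : String) : String := (PySem.Dict.get? SYMBOL_MODULE s).getD ""
def pvDStep (d : PySem.Dict String (List String)) (s : String) : PySem.Dict String (List String) :=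
  PySem.Dict.modify d (pvKm s) [] (· ++ [s])

-- A's accumulation loop is two independent accumulators: the dict over the known
-- symbols (keyed by pvKm) and the list of unknown symbols.
theorem pv_foldA (l : List String) (d : PySem.Dict String (List String)) (u : List String) :
    l.foldl (fun st sym =>
        match PySem.Dict.get? SYMBOL_MODULE sym with
        | some module => (PySem.Dict.modify st.1 module [] (· ++ [sym]), st.2)
        | none => (st.1, st.2 ++ [sym])) (d, u)
      = ((l.filter pvKnown).foldl pvDStep d,
         u ++ l.filter (fun s => (PySem.Dict.get? SYMBOL_MODULE s).isNone)) := by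
  induction l generalizing d u with
  | nil => simp
  | cons s t ih =>
    simp only [List.foldl_cons, List.filter_cons]
    cases h : PySem.Dict.get? SYMBOL_MODULE s with
    | none => simp [h, pvKnown, ih]
    | some m => simp [h, pvKnown, pvKm, pvDStep, ih]

theorem pv_getD (ks : List String) (hks : ∀ s ∈ ks, pvKnown s = true) (m : String) :
    (ks.foldl pvDStep PySem.Dict.empty).getD m []
      = ks.filter (fun s => PySem.Dict.get? SYMBOL_MODULE s == some m) := by
  have h1 : ks.foldl pvDStep PySem.Dict.empty
      = (ks.map (fun s => (pvKm s, s))).foldl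
          (fun d p => PySem.Dict.modify d p.1 [] (· ++ [p.2])) PySem.Dict.empty := by
    rw [List.foldl_map]
    apply PySem.List.foldl_congr_mem
    intro acc x _
    simp only [pvDStep]
  rw [h1, PySem.Dict.getD_foldl_modify_append, List.filter_map, List.map_map]
  have h2 : ∀ s ∈ ks, (((fun p => p.1 == m) ∘ fun s => (pvKm s, s)) s : Bool)
      = (PySem.Dict.get? SYMBOL_MODULE s == some m) := by
    intro s hs
    have hk := hks s hs
    cases h : PySem.Dict.get? SYMBOL_MODULE s with
    | none => simp [pvKnown, h] at hk
    | some v => simp [Function.comp, pvKm, h]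
  rw [List.filter_congr h2]
  have h3 : ∀ s ∈ List.filter (fun s => PySem.Dict.get? SYMBOL_MODULE s == some m) ks,
      (((fun x : String × String => x.2) ∘ fun s => (pvKm s, s)) s) = s := fun s _ => rfl
  exact (List.map_congr_left h3).trans (List.map_id' _)

theorem pv_foldl_shape (ks : List String) :
    ks.foldl pvDStep PySem.Dict.empty
      = ks.foldl (fun d x => PySem.Dict.modify d (pvKm x) []
          ((fun (_ : PySem.Dict String (List String)) (s : String) => (· ++ [s])) d x))
          PySem.Dict.empty := by
  apply PySem.List.foldl_congr_mem
  intro acc x _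
  simp only [pvDStep]

theorem pv_keys (ks : List String) :
    (ks.foldl pvDStep PySem.Dict.empty).keys = PySem.Set.ofList (ks.map pvKm) := by
  rw [pv_foldl_shape,
    PySem.Dict.keys_foldl_modify_key ks pvKm [] (fun _ s => (· ++ [s])) PySem.Dict.empty]
  simp [PySem.Set.update_nil_left]

theorem pv_keys_nodup (ks : List String) :
    (ks.foldl pvDStep PySem.Dict.empty).keys.Nodup := by
  rw [pv_foldl_shape]
  exact PySem.Dict.nodup_keys_foldl_modify_key ks pvKm [] (fun _ s => (· ++ [s]))
    PySem.Dict.empty (by simp)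

theorem pv_modules_pairwise_lt :
    List.Pairwise (fun a b : String => a < b) pvModules :=
  PySem.List.sorted_ofList_pairwise_lt (PySem.Dict.values SYMBOL_MODULE)

theorem pv_mem_modules {s m : String} (h : PySem.Dict.get? SYMBOL_MODULE s = some m) :
    m ∈ pvModules := by
  have h1 : (s, m) ∈ SYMBOL_MODULE.items := PySem.Dict.mem_items_of_get?_eq_some _ h
  have h2 : m ∈ PySem.Dict.values SYMBOL_MODULE := by
    simp only [PySem.Dict.values]
    exact List.mem_map.mpr ⟨(s, m), h1, rfl⟩
  unfold pvModules
  rw [PySem.List.mem_sorted, PySem.Set.mem_ofList]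
  exact h2

-- first half: A equals the intermediate shape
theorem pv_A_eq_mid (symbols : List String) :
    build_import_lines symbols = pvMid symbols := by
  simp only [build_import_lines, pvMid]
  rw [pv_foldA]
  simp only [List.nil_append]
  set ss := PySem.List.sorted symbols (fun x => x) with hss
  set U := List.filter (fun s => (SYMBOL_MODULE.get? s).isNone) ss with hUdef
  set ks := List.filter pvKnown ss with hksdef
  set D := List.foldl pvDStep PySem.Dict.empty ks with hD
  -- ss is weakly sorted, so every filter of it is its own sort
  have hpw : List.Pairwise (fun a b : String => a ≤ b) ss := by
    rw [hss]; exact PySem.List.sorted_pairwise symbols (fun x => x)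
  have hsf : ∀ p : String → Bool,
      PySem.List.sorted (ss.filter p) (fun x => x) = ss.filter p := by
    intro p
    exact PySem.List.sorted_id_eq_of_perm_of_pairwise _ _ (List.Perm.refl _)
      (hpw.sublist List.filter_sublist)
  -- the unknown-symbol accumulators agree
  have hU2 : ss.filter (fun s => !(PySem.Dict.contains SYMBOL_MODULE s)) = U := by
    rw [hUdef]
    apply List.filter_congr
    intro s _
    rw [PySem.Dict.contains_eq_isSome_get?]
    cases PySem.Dict.get? SYMBOL_MODULE s <;> rfl
  have hUs : PySem.List.sorted U (fun x => x) = U := by rw [hUdef]; exact hsf _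
  -- the per-module symbol lists agree
  have hgetD : ∀ m : String,
      PySem.Dict.getD D m [] = ss.filter (fun s => PySem.Dict.get? SYMBOL_MODULE s == some m) := by
    intro m
    rw [hD, pv_getD ks (by
      intro s hs
      rw [hksdef] at hs
      exact (List.mem_filter.mp hs).2), hksdef, List.filter_filter]
    apply List.filter_congr
    intro s _
    cases h : PySem.Dict.get? SYMBOL_MODULE s <;> simp [pvKnown, h]
  -- a key of A's dict is exactly a module with a nonempty symbol list
  have hmem : ∀ m : String, m ∈ PySem.Dict.keys D ↔
      ss.filter (fun s => PySem.Dict.get? SYMBOL_MODULE s == some m) ≠ [] := by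
    intro m
    rw [hD, pv_keys, PySem.Set.mem_ofList, List.mem_map, ← List.isEmpty_eq_false_iff,
      List.isEmpty_eq_false_iff_exists_mem]
    constructor
    · rintro ⟨s, hs, hkm⟩
      rw [hksdef, List.mem_filter] at hs
      obtain ⟨hs1, hs2⟩ := hs
      refine ⟨s, List.mem_filter.mpr ⟨hs1, ?_⟩⟩
      cases h : PySem.Dict.get? SYMBOL_MODULE s with
      | none => rw [pvKnown, h] at hs2; simp at hs2
      | some v => rw [pvKm, h] at hkm; simp_all
    · rintro ⟨s, hs⟩
      rw [List.mem_filter] at hs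
      obtain ⟨hs1, hs2⟩ := hs
      cases h : PySem.Dict.get? SYMBOL_MODULE s with
      | none => rw [h] at hs2; simp at hs2
      | some v =>
        rw [h] at hs2
        refine ⟨s, List.mem_filter.mpr ⟨hs1, by rw [pvKnown, h]; rfl⟩, ?_⟩
        rw [pvKm, h]
        simpa using hs2.symm
  -- sorted(A's keys) is the fixed module table filtered to nonempty groups
  have hkeys : PySem.List.sorted (PySem.Dict.keys D) (fun x => x)
      = pvModules.filter (fun m =>
          decide (ss.filter (fun s => PySem.Dict.get? SYMBOL_MODULE s == some m) ≠ [])) := by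
    apply PySem.List.sorted_eq_of_perm_of_pairwise_lt
    · apply List.perm_of_nodup_nodup_toFinset_eq
      · exact (pv_modules_pairwise_lt.imp (fun h => LT.lt.ne h)).filter _
      · rw [hD]; exact pv_keys_nodup ks
      · apply Finset.ext
        intro m
        simp only [List.mem_toFinset, List.mem_filter, decide_eq_true_eq, hmem]
        constructor
        · rintro ⟨_, h2⟩; exact h2
        · intro h2
          refine ⟨?_, h2⟩
          rw [← List.isEmpty_eq_false_iff, List.isEmpty_eq_false_iff_exists_mem] at h2
          obtain ⟨s, hs⟩ := h2
          rw [List.mem_filter] at hs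
          cases h : PySem.Dict.get? SYMBOL_MODULE s with
          | none => rw [h] at hs; simp at hs
          | some v =>
            rw [h] at hs
            have : v = m := by simpa using hs.2
            exact this ▸ pv_mem_modules h
    · exact pv_modules_pairwise_lt.sublist List.filter_sublist
  -- fold the two line loops into maps and compare element-wise
  rw [PySem.List.foldl_append_singleton_eq_map, List.nil_append,
    PySem.List.foldl_append_ite
      (p := fun m => ss.filter (fun s => PySem.Dict.get? SYMBOL_MODULE s == some m) ≠ [])
      (f := fun module => "from quantclass_sync_internal." ++ module ++ " import " ++
        PySem.Str.join ", " (ss.filter (fun s => PySem.Dict.get? SYMBOL_MODULE s == some module))),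
    List.nil_append, hkeys, hU2, hUs]
  have hline : ∀ m ∈ pvModules.filter (fun m =>
      decide (ss.filter (fun s => PySem.Dict.get? SYMBOL_MODULE s == some m) ≠ [])),
      ("from quantclass_sync_internal." ++ m ++ " import " ++
        PySem.Str.join ", " (PySem.List.sorted (PySem.Dict.getD D m []) (fun x => x)))
      = ("from quantclass_sync_internal." ++ m ++ " import " ++
        PySem.Str.join ", " (ss.filter (fun s => PySem.Dict.get? SYMBOL_MODULE s == some m))) := by
    intro m _
    rw [hgetD m, hsf]
  rw [List.map_congr_left hline]

-- ===== second half: B's table is the inverse of A's =====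

-- the sorted module list, written out
def pvLit : List String :=
  ["cli", "config", "constants", "csv_engine", "file_sync", "http_client",
   "models", "orchestrator", "reporting", "status_store"]

set_option maxRecDepth 20000 in
theorem pv_modules_eq_lit : pvModules = pvLit := by
  apply PySem.List.sorted_eq_of_perm_of_pairwise_lt
  · decide
  · have hp : List.Pairwise (fun a b : String => a.toList < b.toList) pvLit := by decide
    exact hp.imp (fun h => String.lt_iff_toList_lt.mpr h)

-- the literal inverted table really is pvModules paired with their key fibres
set_option maxRecDepth 20000 in
theorem pv_table_eq : MODULE_SYMBOLS = pvModules.map (fun m => (m, pvKfun m)) := by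
  rw [pv_modules_eq_lit]
  decide

-- membership in a fibre list is exactly a successful lookup with that value
theorem pv_fibre_contains (m s : String) :
    ((pvKfun m).contains s) = (PySem.Dict.get? SYMBOL_MODULE s == some m) := by
  have hnd : SYMBOL_MODULE.keys.Nodup := PySem.Dict.nodup_keys_ofList _
  rw [Bool.eq_iff_iff]
  simp only [pvKfun, List.contains_eq_mem, List.mem_map, List.mem_filter, beq_iff_eq,
    decide_eq_true_eq]
  constructor
  · rintro ⟨⟨k, v⟩, ⟨hmem, hv⟩, rfl⟩
    have hv' : v = m := by simpa using hv
    subst hv'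
    exact (PySem.Dict.get?_eq_some_iff_mem_items _ _ _ hnd).mpr hmem
  · intro h
    exact ⟨(s, m), ⟨PySem.Dict.mem_items_of_get?_eq_some _ h, by simp⟩, rfl⟩

-- KNOWN holds exactly the keys of SYMBOL_MODULE
theorem pv_known_contains (s : String) :
    (KNOWN.contains s) = PySem.Dict.contains SYMBOL_MODULE s := by
  rw [PySem.Dict.contains_eq_isSome_get?, Bool.eq_iff_iff]
  simp only [KNOWN, pv_table_eq, List.flatMap_map, List.contains_eq_mem, List.mem_flatMap,
    decide_eq_true_eq]
  constructor
  · rintro ⟨m, _, hs⟩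
    have hc : ((pvKfun m).contains s) = true := by
      simpa [List.contains_eq_mem] using hs
    rw [pv_fibre_contains, beq_iff_eq] at hc
    rw [hc]
    rfl
  · intro h
    rcases hg : PySem.Dict.get? SYMBOL_MODULE s with _ | v
    · rw [hg] at h; simp at h
    · have hc : ((pvKfun v).contains s) = true := by
        rw [pv_fibre_contains, hg]
        simp
      exact ⟨v, pv_mem_modules hg, by simpa [List.contains_eq_mem] using hc⟩

theorem pv_mid_eq_alt (symbols : List String) :
    pvMid symbols = build_import_lines_alt symbols := by
  simp only [pvMid, build_import_lines_alt]
  rw [pv_table_eq, List.foldl_map]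
  have hstep : (fun (lines : List String) (m : String) =>
      let syms := (PySem.List.sorted symbols (fun x => x) false).filter
        (fun s => PySem.Dict.get? SYMBOL_MODULE s == some m)
      if syms ≠ [] then
        lines ++ ["from quantclass_sync_internal." ++ m ++ " import " ++ PySem.Str.join ", " syms]
      else lines)
    = (fun (lines : List String) (m : String) =>
      let group := (PySem.List.sorted symbols (fun x => x) false).filter
        (fun s => (pvKfun m).contains s)
      if group ≠ [] then
        lines ++ ["from quantclass_sync_internal." ++ m ++ " import " ++ PySem.Str.join ", " group]
      else lines) := by
    funext lines m
    have : (fun s => PySem.Dict.get? SYMBOL_MODULE s == some m)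
        = (fun s => ((pvKfun m).contains s)) := by
      funext s
      exact (pv_fibre_contains m s).symm
    simp only [this]
  rw [hstep]
  have hunk : (fun s => !(PySem.Dict.contains SYMBOL_MODULE s))
      = (fun s => !(KNOWN.contains s)) := by
    funext s
    rw [pv_known_contains]
  rw [hunk]

-- ===== VERDICT (by name: the statement is the Claim_ definition above) =====
theorem build_import_lines_spec : Claim_equal_build_import_lines := by
  intro symbols _
  unfold Spec_build_import_lines
  rw [pv_A_eq_mid, pv_mid_eq_alt]
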